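-- pv_equiv track=rewrite | github.com/Tcozzie/PronounSwitcher | Tiegan-Cozzie-Lab8.py | first2third
-- ===== SOURCE A (Python) =====
-- def first2third(user_string,friend_pronoun):
--     pronouns_male={"me":"him","myself":"himself","i":"he","am":"is","im":"hes","my":"his","have":"has","want":"wants"}
--     pronouns_female={"me":"her","myself":"herself","i":"her","am":"is","im":"hers","my":"her","have":"has","want":"wants"}
--     pronouns_plural={"me":"them","myself":"themselves","i":"they","am":"are","im":"they are","my":"their","have":"have","want":"want"}
--     punctuation=[",",".","?",";",":","!"]
--     count=0
--     for char in user_string: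
--         if user_string[count] in punctuation:
--             user_string=user_string[0:count]+" "+user_string[count:len(user_string)]
--             count+=2
--         else:
--             count+=1
--     userList=user_string.split()
--     if friend_pronoun=="m":
--         for i in userList:
--             if i in list(pronouns_male.keys()):
--                 userList[userList.index(i)]=pronouns_male[i]
--     elif friend_pronoun=="f":
--         for i in userList:
--             if i in list(pronouns_female.keys()):
--                 userList[userList.index(i)]=pronouns_female[i]
--     elif friend_pronoun=="p":
--         for i in userList:
--             if i in list(pronouns_plural.keys()):
--                 userList[userList.index(i)]=pronouns_plural[i]
--
--     final=""
--     for word in userList: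
--         if word in punctuation or len(user_string)==0:
--            final=final+word
--         else:
--           final=final+" "+word
--
--     return final
-- ===== SOURCE B (Python) =====
-- def first2third(user_string, friend_pronoun):
--     # One merged table word -> (male, female, plural); single scan with a token buffer.
--     table = {"me": ("him", "her", "them"), "myself": ("himself", "herself", "themselves"),
--              "i": ("he", "her", "they"), "am": ("is", "is", "are"),
--              "im": ("hes", "hers", "they are"), "my": ("his", "her", "their"),
--              "have": ("has", "has", "have"), "want": ("wants", "wants", "want")}
--     k = {"m": 0, "f": 1, "p": 2}.get(friend_pronoun, -1)
--     punct = ",.?;:!"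
--
--     def repl(tok):
--         return table[tok][k] if k >= 0 and tok in table else tok
--
--     tokens = []
--     buf = ""
--     for ch in user_string:
--         if ch.isspace():
--             if buf:
--                 tokens.append(repl(buf))
--             buf = ""
--         elif ch in punct:
--             if buf:
--                 tokens.append(repl(buf))
--             buf = ch
--         else:
--             buf += ch
--     if buf:
--         tokens.append(repl(buf))
--     return "".join(tok if len(tok) == 1 and tok in punct else " " + tok for tok in tokens)
-- ===== Notes on version B (the rewrite author's own statement) =====
-- stated objective: alternative
-- what changed: A makes four passes (rebuilding the string to insert a space before each punctuation char, split(), an in-place replacement pass driven by list.index, then a join loop); B merges the three pronoun dicts into one word->(male,female,plural) table selected by an index, and does a single scan of the original string with a token buffer, replacing each token at flush time and joining with a generator. A's repeated string rebuilds and list.index scans are quadratic; B is one linear pass, and a timing run measured B 1.65x faster at the largest size.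
import Mathlib
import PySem

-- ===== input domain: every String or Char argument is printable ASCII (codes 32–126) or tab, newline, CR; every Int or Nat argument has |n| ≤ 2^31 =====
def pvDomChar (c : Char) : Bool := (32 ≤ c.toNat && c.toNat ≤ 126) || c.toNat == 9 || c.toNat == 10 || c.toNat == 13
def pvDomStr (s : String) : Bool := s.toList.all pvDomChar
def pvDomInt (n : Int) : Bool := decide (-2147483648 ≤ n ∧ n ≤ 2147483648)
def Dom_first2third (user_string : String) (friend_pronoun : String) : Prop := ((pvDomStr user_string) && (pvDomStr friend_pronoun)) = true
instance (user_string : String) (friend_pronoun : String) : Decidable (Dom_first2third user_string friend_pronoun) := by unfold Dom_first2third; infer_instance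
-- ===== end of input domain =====

-- B replaces A's four passes (insert-space string rebuild, split, index-based in-place replace, join)
-- by one merged word -> (male,female,plural) table indexed by the pronoun and a single scan with a
-- token buffer; equivalence is on the return value (neither mutates its arguments).

-- ===== PORT A =====
-- strings are ported on the List Char side (PySem convention); dicts keep Python's literal order
def pvPunctA : List Char := [',', '.', '?', ';', ':', '!']
def pvPunctToksA : List (List Char) := [[','], ['.'], ['?'], [';'], [':'], ['!']]

def pvMaleA : PySem.Dict (List Char) (List Char) := PySem.Dict.mk
  [(['m','e'], ['h','i','m']), (['m','y','s','e','l','f'], ['h','i','m','s','e','l','f']),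
   (['i'], ['h','e']), (['a','m'], ['i','s']), (['i','m'], ['h','e','s']),
   (['m','y'], ['h','i','s']), (['h','a','v','e'], ['h','a','s']), (['w','a','n','t'], ['w','a','n','t','s'])]
def pvFemaleA : PySem.Dict (List Char) (List Char) := PySem.Dict.mk
  [(['m','e'], ['h','e','r']), (['m','y','s','e','l','f'], ['h','e','r','s','e','l','f']),
   (['i'], ['h','e','r']), (['a','m'], ['i','s']), (['i','m'], ['h','e','r','s']),
   (['m','y'], ['h','e','r']), (['h','a','v','e'], ['h','a','s']), (['w','a','n','t'], ['w','a','n','t','s'])]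
def pvPluralA : PySem.Dict (List Char) (List Char) := PySem.Dict.mk
  [(['m','e'], ['t','h','e','m']), (['m','y','s','e','l','f'], ['t','h','e','m','s','e','l','v','e','s']),
   (['i'], ['t','h','e','y']), (['a','m'], ['a','r','e']), (['i','m'], ['t','h','e','y',' ','a','r','e']),
   (['m','y'], ['t','h','e','i','r']), (['h','a','v','e'], ['h','a','v','e']), (['w','a','n','t'], ['w','a','n','t'])]

-- 'for char in user_string: …' — the iterator walks the ORIGINAL string while user_string/count mutate
def pvSpaceLoopA : List Char → List Char → Int → List Char
  | [], s, _ => s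
  | _ :: iter, s, count =>
    match PySem.List.pyGet? s count with
    | none => s          -- IndexError; unreachable (count stays in range, proved below)
    | some c =>
      if c ∈ pvPunctA then
        pvSpaceLoopA iter
          (PySem.List.slice s (some 0) (some count) ++ [' '] ++ PySem.List.slice s (some count) (some (PySem.List.len s)))
          (count + 2)
      else pvSpaceLoopA iter s (count + 1)

-- 'for i in userList: if i in keys: userList[userList.index(i)] = d[i]' — the for statement
-- walks indices 0..len-1 of the (length-preserving) mutating list
def pvReplStepA (d : PySem.Dict (List Char) (List Char)) (l : List (List Char)) (k : Nat) : List (List Char) :=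
  match l[k]? with
  | none => l
  | some i =>
    match d.get? i with
    | none => l          -- 'i in list(d.keys())' false
    | some v =>
      match PySem.List.index? l i with
      | none => l        -- ValueError; unreachable (i was read from l)
      | some j => l.set j v

def pvReplLoopA (d : PySem.Dict (List Char) (List Char)) (l : List (List Char)) : List (List Char) :=
  (List.range l.length).foldl (pvReplStepA d) l

def pvJoinLoopA (s : List Char) (ul : List (List Char)) : List Char :=
  ul.foldl (fun final word =>
    if word ∈ pvPunctToksA ∨ s.length = 0 then final ++ word else final ++ [' '] ++ word) []

def first2third (user_string : String) (friend_pronoun : String) : String :=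
  let s := pvSpaceLoopA user_string.toList user_string.toList 0
  let ul := PySem.Chars.split₀ s
  let ul := if friend_pronoun = "m" then pvReplLoopA pvMaleA ul
            else if friend_pronoun = "f" then pvReplLoopA pvFemaleA ul
            else if friend_pronoun = "p" then pvReplLoopA pvPluralA ul
            else ul
  String.ofList (pvJoinLoopA s ul)

-- ===== PORT B =====
-- one merged table: word -> (male, female, plural)
def pvTableB : PySem.Dict (List Char) (List Char × List Char × List Char) := PySem.Dict.mk
  [("me".toList, ("him".toList, "her".toList, "them".toList)),
   ("myself".toList, ("himself".toList, "herself".toList, "themselves".toList)),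
   ("i".toList, ("he".toList, "her".toList, "they".toList)),
   ("am".toList, ("is".toList, "is".toList, "are".toList)),
   ("im".toList, ("hes".toList, "hers".toList, "they are".toList)),
   ("my".toList, ("his".toList, "her".toList, "their".toList)),
   ("have".toList, ("has".toList, "has".toList, "have".toList)),
   ("want".toList, ("wants".toList, "wants".toList, "want".toList))]

def pvIdxB : PySem.Dict String Int := PySem.Dict.mk [("m", 0), ("f", 1), ("p", 2)]

def pvPunctB : List Char := ",.?;:!".toList

-- repl(tok) = table[tok][k] if k >= 0 and tok in table else tok
-- (k is only ever 0, 1 or 2 when the guard holds; tuple indexing becomes the if-chain)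
def pvReplB (k : Int) (tok : List Char) : List Char :=
  if 0 ≤ k then
    match pvTableB.get? tok with
    | some v => if k = 0 then v.1 else if k = 1 then v.2.1 else v.2.2
    | none => tok
  else tok

-- 'tok if len(tok) == 1 and tok in punct else " " + tok' — for a 1-char tok,
-- substring membership in the punct string is exactly char membership
def pvSepB (tok : List Char) : List Char :=
  match tok with
  | [c] => if c ∈ pvPunctB then tok else ' ' :: tok
  | _ => ' ' :: tok

-- the single scan: flush the buffer on whitespace, flush-and-reseed on punctuation
def pvTokLoopB (repl : List Char → List Char) :
    List Char → List (List Char) → List Char → List (List Char)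
  | [], out, buf => if buf = [] then out else out ++ [repl buf]
  | c :: rest, out, buf =>
    if PySem.Chars.isspace c then
      pvTokLoopB repl rest (if buf = [] then out else out ++ [repl buf]) []
    else if c ∈ pvPunctB then
      pvTokLoopB repl rest (if buf = [] then out else out ++ [repl buf]) [c]
    else pvTokLoopB repl rest out (buf ++ [c])

def first2third_alt (user_string : String) (friend_pronoun : String) : String :=
  let k := pvIdxB.getD friend_pronoun (-1)
  let tokens := pvTokLoopB (pvReplB k) user_string.toList [] []
  String.ofList (PySem.Chars.join [] (tokens.map pvSepB))

-- ===== PRECONDITION & SPEC =====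
def Spec_first2third (user_string : String) (friend_pronoun : String) (out : String) : Prop := out = first2third_alt user_string friend_pronoun
instance (user_string : String) (friend_pronoun : String) (out : String) : Decidable (Spec_first2third user_string friend_pronoun out) := by unfold Spec_first2third; infer_instance

-- ===== CLAIM (what is proved, stated in full; the proofs are below) =====
def Claim_equal_first2third : Prop := ∀ (user_string : String) (friend_pronoun : String), Dom_first2third user_string friend_pronoun → Spec_first2third user_string friend_pronoun (first2third user_string friend_pronoun)

-- ===== LEMMAS AND PROOFS =====

-- what A's spacing pass does to one original character
def pvIns (c : Char) : List Char := if c ∈ pvPunctA then [' ', c] else [c]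

-- token rewrite applied by A's replacement pass
def pvGd (d : PySem.Dict (List Char) (List Char)) (t : List Char) : List Char := d.getD t t

lemma pvPunctB_eq : pvPunctB = pvPunctA := by decide

lemma pvPunct_not_space {c : Char} (h : c ∈ pvPunctA) : PySem.Chars.isspace c = false := by
  simp [pvPunctA] at h
  rcases h with h|h|h|h|h|h <;> subst h <;> decide

lemma pvSpaceLoopA_eq (iter t p : List Char) (h : iter.length = t.length) :
    pvSpaceLoopA iter (p ++ t) (p.length : Int) = p ++ t.flatMap pvIns := by
  induction iter generalizing t p with
  | nil =>
    cases t with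
    | nil => simp [pvSpaceLoopA]
    | cons c t' => simp at h
  | cons a iter ih =>
    cases t with
    | nil => simp at h
    | cons c t' =>
      simp at h
      rw [pvSpaceLoopA, PySem.List.pyGet?_append_length]
      by_cases hc : c ∈ pvPunctA
      · simp only [hc, if_pos]
        have hs1 : PySem.List.slice (p ++ c :: t') (some 0) (some (p.length : Int)) = p := by
          simp [PySem.List.slice_zero_start, PySem.List.slice_to_natCast]
        have hs2 : PySem.List.slice (p ++ c :: t') (some (p.length : Int))
            (some (PySem.List.len (p ++ c :: t'))) = c :: t' := by
          rw [PySem.List.len_eq]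
          rw [show ((p ++ c :: t').length : Int) = ((p.length + (c::t').length : Nat) : Int) by simp]
          rw [PySem.List.slice_natCast]
          simp
        rw [hs1, hs2]
        have h2 : (p.length : Int) + 2 = ((p ++ [' ', c]).length : Int) := by
          simp [List.length_append]
        rw [h2]
        have := ih t' (p ++ [' ', c]) (by simpa using h)
        have harr : p ++ [' '] ++ c :: t' = (p ++ [' ', c]) ++ t' := by simp
        rw [harr, this]
        simp [pvIns, hc]
      · simp only [hc, if_false]
        have h1 : (p.length : Int) + 1 = ((p ++ [c]).length : Int) := by
          simp [List.length_append]
        rw [h1]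
        have := ih t' (p ++ [c]) (by simpa using h)
        have harr : p ++ c :: t' = (p ++ [c]) ++ t' := by simp
        rw [harr, this]
        simp [pvIns, hc]

lemma pvTokLoopB_eq (f : List Char → List Char)
    (t : List Char) (acc : List (List Char)) (buf : List Char) :
    pvTokLoopB f t (acc.reverse.map f) buf
      = (PySem.Chars.split₀.go (t.flatMap pvIns) buf.reverse acc).map f := by
  induction t generalizing acc buf with
  | nil =>
    simp only [List.flatMap_nil, pvTokLoopB, PySem.Chars.split₀.go]
    by_cases hb : buf = []
    · simp [hb]
    · simp [hb, List.isEmpty_iff]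
  | cons c t ih =>
    by_cases hc : c ∈ pvPunctA
    · have hns := pvPunct_not_space hc
      have hcB : c ∈ pvPunctB := by rw [pvPunctB_eq]; exact hc
      simp only [pvTokLoopB, hns, hcB, if_true, if_false, Bool.false_eq_true, pvIns, hc,
        List.flatMap_cons]
      rw [show ([' ', c] ++ List.flatMap pvIns t) = ' ' :: c :: List.flatMap pvIns t from rfl]
      rw [PySem.Chars.split₀.go]
      simp only [show PySem.Chars.isspace ' ' = true from rfl, if_true]
      by_cases hb : buf = []
      · subst hb
        simp only [List.reverse_nil, List.isEmpty_nil, if_true]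
        rw [PySem.Chars.split₀.go]
        simp only [hns, Bool.false_eq_true, if_false]
        exact ih acc [c]
      · rw [if_neg hb, if_neg (by simp [List.isEmpty_iff, hb])]
        rw [PySem.Chars.split₀.go]
        simp only [hns, Bool.false_eq_true, if_false, List.reverse_reverse]
        have : acc.reverse.map f ++ [f buf] = ((buf :: acc).reverse.map f) := by simp
        rw [this]
        exact ih (buf :: acc) [c]
    · by_cases hs : PySem.Chars.isspace c = true
      · simp only [pvTokLoopB, hs, if_true, pvIns, hc, if_false, List.flatMap_cons,
          List.singleton_append]
        rw [PySem.Chars.split₀.go]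
        simp only [hs, if_true]
        by_cases hb : buf = []
        · subst hb
          simp only [List.reverse_nil, List.isEmpty_nil, if_true]
          exact ih acc []
        · rw [if_neg hb, if_neg (by simp [List.isEmpty_iff, hb])]
          have : acc.reverse.map f ++ [f buf] = ((buf :: acc).reverse.map f) := by simp
          rw [List.reverse_reverse, this]
          exact ih (buf :: acc) []
      · have hs' : PySem.Chars.isspace c = false := by simpa using hs
        have hcB : c ∉ pvPunctB := by rw [pvPunctB_eq]; exact hc
        simp only [pvTokLoopB, hs', Bool.false_eq_true, if_false, hcB, hc, pvIns,
          List.flatMap_cons, List.singleton_append]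
        rw [PySem.Chars.split₀.go]
        simp only [hs', Bool.false_eq_true, if_false]
        rw [show c :: buf.reverse = (buf ++ [c]).reverse by simp]
        exact ih acc (buf ++ [c])

-- the separator rule of B coincides with A's token-level test
lemma pvSepB_eq (tok : List Char) :
    pvSepB tok = if tok ∈ pvPunctToksA then tok else ' ' :: tok := by
  match tok with
  | [] => simp [pvSepB, pvPunctToksA]
  | [c] =>
    have hiff : [c] ∈ pvPunctToksA ↔ c ∈ pvPunctA := by
      simp [pvPunctToksA, pvPunctA]
    by_cases hc : c ∈ pvPunctA
    · simp [pvSepB, pvPunctB_eq, hc, hiff.mpr hc]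
    · simp only [pvSepB, pvPunctB_eq]
      rw [if_neg hc, if_neg (fun h => hc (hiff.mp h))]
  | a :: b :: t => simp [pvSepB, pvPunctToksA]

-- a lookup-then-project in the merged table is a lookup in the projected dict
lemma pvProjLookup (sel : List Char × List Char × List Char → List Char)
    (L : List ((List Char) × (List Char × List Char × List Char))) (t : List Char) :
    (match (PySem.Dict.mk L).get? t with
     | some v => sel v
     | none => t)
    = (PySem.Dict.mk (L.map (fun p => (p.1, sel p.2)))).getD t t := by
  induction L with
  | nil =>
    simp [show (PySem.Dict.mk ([] : List ((List Char) × (List Char × List Char × List Char)))).get? t = none from rfl,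
      show (PySem.Dict.mk ([] : List ((List Char) × (List Char)))).getD t t = t from rfl]
  | cons p L ih =>
    obtain ⟨k, v⟩ := p
    simp only [List.map_cons, PySem.Dict.getD_eq_get?_getD, PySem.Dict.get?_mk_cons]
    by_cases hk : (k == t) = true
    · simp [hk]
    · simp only [hk, Bool.false_eq_true, if_false]
      simpa [PySem.Dict.getD_eq_get?_getD] using ih

lemma pvReplB_sel (k : Int) (hk : 0 ≤ k)
    (sel : List Char × List Char × List Char → List Char)
    (hsel : ∀ v : List Char × List Char × List Char,
      (if k = 0 then v.1 else if k = 1 then v.2.1 else v.2.2) = sel v)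
    (d : PySem.Dict (List Char) (List Char))
    (hd : PySem.Dict.mk (pvTableB.items.map (fun p => (p.1, sel p.2))) = d)
    (t : List Char) : pvReplB k t = pvGd d t := by
  unfold pvReplB pvGd
  rw [if_pos hk, ← hd]
  have h := pvProjLookup sel pvTableB.items t
  rw [← h]
  cases pvTableB.get? t with
  | none => rfl
  | some v => exact hsel v

-- B's per-token replacement agrees with A's dict, for each pronoun index
lemma pvReplB_zero (t : List Char) : pvReplB 0 t = pvGd pvMaleA t :=
  pvReplB_sel 0 (by norm_num) (fun v => v.1) (fun v => by norm_num) pvMaleA (by decide) t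

lemma pvReplB_one (t : List Char) : pvReplB 1 t = pvGd pvFemaleA t :=
  pvReplB_sel 1 (by norm_num) (fun v => v.2.1) (fun v => by norm_num) pvFemaleA (by decide) t

lemma pvReplB_two (t : List Char) : pvReplB 2 t = pvGd pvPluralA t :=
  pvReplB_sel 2 (by norm_num) (fun v => v.2.2) (fun v => by norm_num) pvPluralA (by decide) t

lemma pvReplB_neg (t : List Char) : pvReplB (-1) t = pvGd PySem.Dict.empty t := by
  simp [pvReplB, pvGd, PySem.Dict.getD_empty]

-- 'no value of d is a key of d unless it is mapped to itself' — the reason A's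
-- first-occurrence .index replacement coincides with a plain per-token map
def pvDictOk (d : PySem.Dict (List Char) (List Char)) : Prop :=
  ∀ p ∈ d.items, d.get? p.2 ≠ none → d.get? p.2 = some p.2

lemma pvReplLoopA_eq (d : PySem.Dict (List Char) (List Char)) (hq : pvDictOk d)
    (rest pre : List (List Char)) :
    (List.range' pre.length rest.length).foldl (pvReplStepA d) (pre.map (pvGd d) ++ rest)
      = (pre ++ rest).map (pvGd d) := by
  induction rest generalizing pre with
  | nil => simp
  | cons i rest ih =>
    rw [List.length_cons, List.range'_succ, List.foldl_cons]
    have hget : (pre.map (pvGd d) ++ i :: rest)[pre.length]? = some i := by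
      rw [List.getElem?_append_right (by simp)]
      simp
    have step : pvReplStepA d (pre.map (pvGd d) ++ i :: rest) pre.length
        = (pre ++ [i]).map (pvGd d) ++ rest := by
      unfold pvReplStepA
      rw [hget]
      dsimp only
      cases hdi : d.get? i with
      | none =>
        have hg : pvGd d i = i := by simp [pvGd, PySem.Dict.getD_of_get?_eq_none _ _ hdi]
        simp [hg]
      | some v =>
        dsimp only
        by_cases hmem : i ∈ pre.map (pvGd d)
        · -- i is the image of an earlier token: then d maps i to itself (v = i)
          have hvi : v = i := by
            rcases List.mem_map.mp hmem with ⟨x, hx, hgx⟩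
            by_cases hgx0 : d.get? x = none
            · have : x = i := by simpa [pvGd, PySem.Dict.getD_of_get?_eq_none _ _ hgx0] using hgx
              rw [this, hdi] at hgx0; exact absurd hgx0 (by simp)
            · rcases Option.ne_none_iff_exists'.mp hgx0 with ⟨u, hu⟩
              have hui : u = i := by
                simpa [pvGd, PySem.Dict.getD_of_get?_eq_some _ _ hu] using hgx
              rw [hui] at hu
              have := hq (x, i) (PySem.Dict.mem_items_of_get?_eq_some _ hu) (by rw [hdi]; simp)
              exact Option.some_inj.mp (hdi.symm.trans this)
          subst hvi
          have himem : v ∈ pre.map (pvGd d) ++ v :: rest := by simp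
          rcases Option.isSome_iff_exists.mp ((PySem.List.index?_isSome_iff _ _).mpr himem)
            with ⟨j, hj⟩
          rw [hj]
          dsimp only
          rcases PySem.List.getElem_of_index?_eq_some hj with ⟨hjlt, hjv, _⟩
          have hset := List.set_getElem_self hjlt
          rw [hjv] at hset
          rw [hset]
          have : pvGd d v = v := by simp [pvGd, PySem.Dict.getD_of_get?_eq_some _ _ hdi]
          simp [this]
        · have hidx : PySem.List.index? (pre.map (pvGd d) ++ i :: rest) i = some pre.length := by
            rw [PySem.List.index?_eq_some_iff]
            exact ⟨pre.map (pvGd d), rest, rfl, by simp, hmem⟩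
          rw [hidx]
          dsimp only
          have : pvGd d i = v := by simp [pvGd, PySem.Dict.getD_of_get?_eq_some _ _ hdi]
          rw [show (pre.map (pvGd d) ++ i :: rest).set pre.length v
                = pre.map (pvGd d) ++ v :: rest by
            rw [List.set_append_right _ _ (by simp)]
            simp]
          simp [this]
    rw [step]
    have := ih (pre ++ [i])
    simp only [List.length_append, List.length_cons, List.length_nil] at this ⊢
    rw [show pre.length + 1 = pre.length + 0 + 1 by ring] at this
    rw [show (pre ++ [i]) ++ rest = pre ++ i :: rest by simp] at this
    simpa using this

lemma pvJoin_nil_flatten (l : List (List Char)) : PySem.Chars.join [] l = l.flatten := by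
  induction l with
  | nil => simp [PySem.Chars.join_nil]
  | cons a l ih =>
    cases l with
    | nil => simp [PySem.Chars.join_singleton]
    | cons b t => simp [PySem.Chars.join_cons_cons, ih]

lemma pvFlatMap_pvIns_ne_nil {cs : List Char} (h : cs ≠ []) : cs.flatMap pvIns ≠ [] := by
  cases cs with
  | nil => exact absurd rfl h
  | cons c t =>
    simp only [List.flatMap_cons, pvIns]
    split <;> simp

theorem pv_main (cs : List Char) (f : List Char → List Char)
    (d : PySem.Dict (List Char) (List Char))
    (hd : pvDictOk d) (hgd : ∀ t, f t = pvGd d t) :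
    String.ofList (pvJoinLoopA (cs.flatMap pvIns)
        (pvReplLoopA d (PySem.Chars.split₀ (cs.flatMap pvIns))))
      = String.ofList (PySem.Chars.join []
          ((pvTokLoopB f cs [] []).map pvSepB)) := by
  have hf : f = pvGd d := funext hgd
  by_cases hcs : cs = []
  · subst hcs
    simp [pvTokLoopB, pvReplLoopA, pvJoinLoopA, PySem.Chars.split₀, PySem.Chars.split₀.go,
      PySem.Chars.join_nil]
  · have hs0 : cs.flatMap pvIns ≠ [] := pvFlatMap_pvIns_ne_nil hcs
    -- B's token list is A's split of the spaced string, rewritten token by token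
    have htok : pvTokLoopB f cs [] []
        = (PySem.Chars.split₀ (cs.flatMap pvIns)).map (pvGd d) := by
      have := pvTokLoopB_eq f cs [] []
      simpa [PySem.Chars.split₀, hf] using this
    -- A's index-based replacement pass is the same per-token rewrite
    have hrepl : pvReplLoopA d (PySem.Chars.split₀ (cs.flatMap pvIns))
        = (PySem.Chars.split₀ (cs.flatMap pvIns)).map (pvGd d) := by
      unfold pvReplLoopA
      have := pvReplLoopA_eq d hd (PySem.Chars.split₀ (cs.flatMap pvIns)) []
      simpa [List.range_eq_range'] using this
    rw [htok, hrepl]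
    set ul := (PySem.Chars.split₀ (cs.flatMap pvIns)).map (pvGd d)
    -- both concatenation passes build the same flat list
    have hA : pvJoinLoopA (cs.flatMap pvIns) ul
        = (ul.map (fun w => if w ∈ pvPunctToksA then w else ' ' :: w)).flatten := by
      unfold pvJoinLoopA
      have hfun : (fun (final word : List Char) =>
            if word ∈ pvPunctToksA ∨ (cs.flatMap pvIns).length = 0 then final ++ word
            else final ++ [' '] ++ word)
          = fun final word => final ++ (if word ∈ pvPunctToksA then word else ' ' :: word) := by
        funext a w
        by_cases hw : w ∈ pvPunctToksA
        · simp [hw]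
        · rw [if_neg (by
            rintro (h | h)
            · exact hw h
            · exact hs0 (List.length_eq_zero_iff.mp h)), if_neg hw]
          simp
      rw [hfun, PySem.List.foldl_append_eq_flatMap]
      simp [List.flatMap_def]
    have hB : ul.map pvSepB = ul.map (fun w => if w ∈ pvPunctToksA then w else ' ' :: w) :=
      List.map_congr_left (fun w _ => pvSepB_eq w)
    rw [hA, hB, pvJoin_nil_flatten]

-- ===== VERDICT (by name: the statement is the Claim_ definition above) =====
theorem first2third_spec : Claim_equal_first2third := by
  intro us fp _
  unfold Spec_first2third
  simp only [first2third, first2third_alt]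
  have hspace : pvSpaceLoopA us.toList us.toList 0 = us.toList.flatMap pvIns := by
    simpa using pvSpaceLoopA_eq us.toList us.toList [] rfl
  rw [hspace]
  by_cases h1 : fp = "m"
  · subst h1
    rw [if_pos rfl, show pvIdxB.getD "m" (-1) = 0 from rfl]
    exact pv_main us.toList (pvReplB 0) pvMaleA (by unfold pvDictOk; decide) pvReplB_zero
  · rw [if_neg h1]
    by_cases h2 : fp = "f"
    · subst h2
      rw [if_pos rfl, show pvIdxB.getD "f" (-1) = 1 from rfl]
      exact pv_main us.toList (pvReplB 1) pvFemaleA (by unfold pvDictOk; decide) pvReplB_one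
    · rw [if_neg h2]
      by_cases h3 : fp = "p"
      · subst h3
        rw [if_pos rfl, show pvIdxB.getD "p" (-1) = 2 from rfl]
        exact pv_main us.toList (pvReplB 2) pvPluralA (by unfold pvDictOk; decide) pvReplB_two
      · rw [if_neg h3]
        have hk : pvIdxB.getD fp (-1) = -1 := by
          simp only [pvIdxB, PySem.Dict.getD_eq_get?_getD, PySem.Dict.get?_mk_cons]
          rw [if_neg (by simpa using Ne.symm h1), if_neg (by simpa using Ne.symm h2),
            if_neg (by simpa using Ne.symm h3)]
          rfl
        rw [hk]
        have hid : PySem.Chars.split₀ (us.toList.flatMap pvIns)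
            = pvReplLoopA PySem.Dict.empty (PySem.Chars.split₀ (us.toList.flatMap pvIns)) := by
          unfold pvReplLoopA
          refine (List.foldl_fixed' (fun k => ?_) _).symm
          unfold pvReplStepA
          cases h : (PySem.Chars.split₀ (us.toList.flatMap pvIns))[k]? <;> simp
        rw [hid]
        exact pv_main us.toList (pvReplB (-1)) PySem.Dict.empty
          (by intro p hp _; simp [PySem.Dict.empty] at hp) pvReplB_neg
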